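-- pv_equiv track=rewrite | github.com/Anil-962/ai-crop-smart-irrigation | frontend/global_comment_transform.py | convert_comments
-- ===== SOURCE A (Python) =====
-- def convert_comments(text):
--     lines = text.split('\n')
--     new_lines = []
--     for line in lines:
--         if '//' in line:
--             # Simple replacement for now, being careful with indentation
--             parts = line.split('//', 1)
--             new_line = parts[0] + '/* ' + parts[1].strip() + ' */'
--             new_lines.append(new_line)
--         else:
--             new_lines.append(line)
--     return '\n'.join(new_lines)
-- ===== SOURCE B (Python) =====
-- def convert_comments(text):
--     # Single left-to-right scan: copy characters verbatim; at each double-slash comment marker emit a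
--     # '/* ... */' block built from the stripped text up to the end of the line.
--     out = []
--     i = 0
--     n = len(text)
--     while i < n:
--         if text.startswith('//', i):
--             j = text.find('\n', i)
--             if j == -1:
--                 j = n
--             out.append('/* ' + text[i + 2:j].strip() + ' */')
--             i = j
--         else:
--             out.append(text[i])
--             i += 1
--     return ''.join(out)
-- ===== Notes on version B (the rewrite author's own statement) =====
-- stated objective: alternative
-- what changed: Replaces A's split-into-lines / per-line maxsplit-1 split / join pipeline with a single left-to-right scan of the whole text that copies characters and rewrites each double-slash comment in place up to the next newline.
import Mathlib
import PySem

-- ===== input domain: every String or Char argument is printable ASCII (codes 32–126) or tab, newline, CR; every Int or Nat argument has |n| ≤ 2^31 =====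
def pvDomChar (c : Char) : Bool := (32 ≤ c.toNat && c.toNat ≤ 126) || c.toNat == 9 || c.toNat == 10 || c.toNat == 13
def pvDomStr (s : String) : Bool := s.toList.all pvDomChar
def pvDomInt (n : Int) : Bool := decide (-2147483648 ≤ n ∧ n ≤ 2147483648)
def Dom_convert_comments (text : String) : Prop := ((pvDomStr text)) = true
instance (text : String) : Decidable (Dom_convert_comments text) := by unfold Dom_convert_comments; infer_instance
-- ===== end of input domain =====

-- B replaces A's split-lines/transform/join pipeline by a single left-to-right scan of the
-- text that rewrites each double-slash comment in place (objective: alternative).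

-- ===== PORT A =====
-- body of A's per-line branch (string work on the List Char side, per PySem convention);
-- parts[0]/parts[1] are read with pyGetD: the membership guard guarantees two parts exist
def convertLineA (line : List Char) : List Char :=
  if PySem.Chars.isIn ['/', '/'] line then
    let parts := PySem.Chars.splitOnMax line ['/', '/'] 1
    PySem.List.pyGetD parts 0 [] ++ "/* ".toList
      ++ PySem.Chars.strip (PySem.List.pyGetD parts 1 []) ++ " */".toList
  else line

def convert_comments (text : String) : String :=
  let lines := PySem.Chars.splitOn text.toList ['\n']
  let new_lines := lines.foldl (fun acc line => acc ++ [convertLineA line]) []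
  String.ofList (PySem.Chars.join ['\n'] new_lines)

-- ===== PORT B =====
-- Source B's scanner: copy chars; at a double-slash marker emit the block comment built from the
-- stripped text up to the line end, resuming at the newline (takeWhile/dropWhile ≙ find + slice)
def altGo : List Char → List Char
  | [] => []
  | c :: rest =>
      if c = '/' ∧ rest.head? = some '/' then
        "/* ".toList ++ PySem.Chars.strip (rest.tail.takeWhile (· ≠ '\n')) ++ " */".toList
          ++ altGo (rest.tail.dropWhile (· ≠ '\n'))
      else c :: altGo rest
termination_by l => l.length
decreasing_by
  · have h1 := List.length_dropWhile_le (fun c => decide (c ≠ '\n')) rest.tail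
    have h2 : rest.tail.length ≤ rest.length := by cases rest <;> simp
    simp only [List.length_cons]
    omega
  · simp

def convert_comments_alt (text : String) : String :=
  String.ofList (altGo text.toList)

-- ===== PRECONDITION & SPEC =====
def Spec_convert_comments (text : String) (out : String) : Prop := out = convert_comments_alt text
instance (text : String) (out : String) : Decidable (Spec_convert_comments text out) := by unfold Spec_convert_comments; infer_instance

-- ===== CLAIM (what is proved, stated in full; the proofs are below) =====
def Claim_equal_convert_comments : Prop := ∀ (text : String), Dom_convert_comments text → Spec_convert_comments text (convert_comments text)

-- ===== LEMMAS AND PROOFS =====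

-- reference recursion for text.split('\n')
def splitNL : List Char → List (List Char)
  | [] => [[]]
  | c :: r =>
      if c = '\n' then [] :: splitNL r
      else
        match splitNL r with
        | [] => [[c]]
        | h :: t => (c :: h) :: t

-- first occurrence of '//' : some (before, after) or none
def scan1 : List Char → Option (List Char × List Char)
  | [] => none
  | c :: r =>
      if c = '/' ∧ r.head? = some '/' then some ([], r.tail)
      else (scan1 r).map (fun pq => (c :: pq.1, pq.2))

def hcons (p : List Char) : List (List Char) → List (List Char)
  | [] => [p]
  | h :: t => (p ++ h) :: t

theorem splitNL_ne_nil (l : List Char) : splitNL l ≠ [] := by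
  induction l with
  | nil => simp [splitNL]
  | cons c r ih =>
    simp only [splitNL]
    split
    · simp
    · split
      · simp
      · simp

theorem goOn_eq (fuel : Nat) (l cur : List Char) (acc : List (List Char))
    (h : l.length < fuel) :
    PySem.Chars.splitOn.go ['\n'] fuel l cur acc
      = acc.reverse ++ hcons cur.reverse (splitNL l) := by
  induction fuel generalizing l cur acc with
  | zero => exact absurd h (Nat.not_lt_zero _)
  | succ f ih =>
    cases l with
    | nil => simp [PySem.Chars.splitOn.go, splitNL, hcons]
    | cons c rest =>
      by_cases hc : c = '\n'
      · subst hc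
        rw [show PySem.Chars.splitOn.go ['\n'] (f + 1) ('\n' :: rest) cur acc
              = PySem.Chars.splitOn.go ['\n'] f rest [] (cur.reverse :: acc) by
            simp [PySem.Chars.splitOn.go]]
        rw [ih rest [] (cur.reverse :: acc) (by simp at h; omega)]
        rcases hs : splitNL rest with _ | ⟨hd, tl⟩
        · exact absurd hs (splitNL_ne_nil rest)
        · simp [splitNL, hcons, hs]
      · rw [show PySem.Chars.splitOn.go ['\n'] (f + 1) (c :: rest) cur acc
              = PySem.Chars.splitOn.go ['\n'] f rest (c :: cur) acc by
            simp [PySem.Chars.splitOn.go, List.isPrefixOf, Ne.symm hc]]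
        rw [ih rest (c :: cur) acc (by simp at h; omega)]
        rcases hs : splitNL rest with _ | ⟨hd, tl⟩
        · exact absurd hs (splitNL_ne_nil rest)
        · simp [splitNL, hcons, hs, hc]

theorem splitOn_eq_splitNL (l : List Char) :
    PySem.Chars.splitOn l ['\n'] = splitNL l := by
  rw [PySem.Chars.splitOn, goOn_eq (l.length + 1) l [] [] (Nat.lt_succ_self _)]
  rcases hs : splitNL l with _ | ⟨hd, tl⟩
  · exact absurd hs (splitNL_ne_nil l)
  · simp [hcons]

theorem go2_zero (fuel : Nat) (l cur : List Char) (acc : List (List Char)) :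
    PySem.Chars.splitOnMax.go ['/', '/'] fuel 0 l cur acc
      = ((cur.reverse ++ l) :: acc).reverse := by
  cases fuel with
  | zero => simp [PySem.Chars.splitOnMax.go]
  | succ f =>
    cases l with
    | nil => simp [PySem.Chars.splitOnMax.go]
    | cons c rest => simp [PySem.Chars.splitOnMax.go]

theorem go2_one (fuel : Nat) (l cur : List Char) (acc : List (List Char))
    (h : l.length < fuel) :
    PySem.Chars.splitOnMax.go ['/', '/'] fuel 1 l cur acc
      = match scan1 l with
        | none => ((cur.reverse ++ l) :: acc).reverse
        | some (p, q) => acc.reverse ++ [cur.reverse ++ p, q] := by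
  induction fuel generalizing l cur acc with
  | zero => exact absurd h (Nat.not_lt_zero _)
  | succ f ih =>
    cases l with
    | nil => simp [PySem.Chars.splitOnMax.go, scan1]
    | cons c rest =>
      by_cases hg : c = '/' ∧ rest.head? = some '/'
      · obtain ⟨rfl, hh⟩ := hg
        obtain ⟨r', rfl⟩ : ∃ r', rest = '/' :: r' := by
          cases rest with
          | nil => simp at hh
          | cons a t => exact ⟨t, by simp at hh; simp [hh]⟩
        rw [show PySem.Chars.splitOnMax.go ['/', '/'] (f + 1) 1 ('/' :: '/' :: r') cur acc
              = PySem.Chars.splitOnMax.go ['/', '/'] f 0 r' [] (cur.reverse :: acc) by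
            simp [PySem.Chars.splitOnMax.go, List.isPrefixOf]]
        rw [go2_zero]
        simp [scan1]
      · have hpre : ['/', '/'].isPrefixOf (c :: rest) = false := by
          cases rest with
          | nil => simp [List.isPrefixOf]
          | cons a t =>
            simp only [List.isPrefixOf, Bool.and_eq_false_iff]
            by_cases hc : c = '/'
            · subst hc
              have : a ≠ '/' := fun hA => hg ⟨rfl, by simp [hA]⟩
              simp [beq_eq_false_iff_ne, Ne.symm this]
            · simp [beq_eq_false_iff_ne, Ne.symm hc]
        rw [show PySem.Chars.splitOnMax.go ['/', '/'] (f + 1) 1 (c :: rest) cur acc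
              = PySem.Chars.splitOnMax.go ['/', '/'] f 1 rest (c :: cur) acc by
            simp [PySem.Chars.splitOnMax.go, hpre]]
        rw [ih rest (c :: cur) acc (by simp at h; omega)]
        rw [show scan1 (c :: rest) = (scan1 rest).map (fun pq => (c :: pq.1, pq.2)) by
            simp [scan1, hg]]
        rcases hs : scan1 rest with _ | ⟨p, q⟩ <;> simp

theorem splitOnMax_of_scan1 (l p q : List Char) (h : scan1 l = some (p, q)) :
    PySem.Chars.splitOnMax l ['/', '/'] 1 = [p, q] := by
  rw [PySem.Chars.splitOnMax, if_neg (by norm_num)]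
  rw [show ((1 : Int).toNat) = 1 from rfl]
  rw [go2_one (l.length + 1) l [] [] (Nat.lt_succ_self _)]
  simp [h]

theorem scan1_none_iff (l : List Char) :
    scan1 l = none ↔ PySem.Chars.isIn ['/', '/'] l = false := by
  rw [PySem.Chars.isIn_eq_false_iff]
  induction l with
  | nil => simp [scan1]
  | cons c r ih =>
    simp only [scan1]
    split
    case isTrue h =>
      obtain ⟨hc, hh⟩ := h
      obtain ⟨r', rfl⟩ : ∃ r', r = '/' :: r' := by
        cases r with
        | nil => simp at hh
        | cons a t => exact ⟨t, by simpa using by simp at hh; simp [hh]⟩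
      subst hc
      simp only [reduceCtorEq, false_iff, not_not]
      exact ⟨[], r', by simp⟩
    case isFalse h =>
      rw [List.infix_cons_iff]
      simp only [Option.map_eq_none_iff, ih]
      constructor
      · rintro hr (hp | hi)
        · rw [List.cons_prefix_cons] at hp
          obtain ⟨hc, hp⟩ := hp
          cases r with
          | nil => simp at hp
          | cons a t =>
            rw [List.cons_prefix_cons] at hp
            exact h ⟨hc.symm, by simp [hp.1.symm]⟩
        · exact hr hi
      · intro hni hi
        exact hni (Or.inr hi)

theorem convertLineA_none (l : List Char) (h : scan1 l = none) :
    convertLineA l = l := by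
  rw [scan1_none_iff] at h
  simp [convertLineA, h]

theorem convertLineA_some (l p q : List Char) (h : scan1 l = some (p, q)) :
    convertLineA l = p ++ "/* ".toList ++ PySem.Chars.strip q ++ " */".toList := by
  have hin : PySem.Chars.isIn ['/', '/'] l = true := by
    rcases Bool.eq_false_or_eq_true (PySem.Chars.isIn ['/', '/'] l) with ht | hf
    · exact ht
    · rw [← scan1_none_iff] at hf
      simp [hf] at h
  rw [convertLineA, if_pos hin, splitOnMax_of_scan1 l p q h]
  simp [PySem.List.pyGetD, PySem.List.pyGet?, PySem.List.pyIdx?]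

theorem altGo_line (l rest : List Char) (hnl : '\n' ∉ l)
    (hr : rest = [] ∨ ∃ r, rest = '\n' :: r) :
    altGo (l ++ rest)
      = (match scan1 l with
         | none => l
         | some (p, q) => p ++ "/* ".toList ++ PySem.Chars.strip q ++ " */".toList)
        ++ altGo rest := by
  induction l with
  | nil => simp [scan1]
  | cons c t ih =>
    simp only [List.mem_cons, not_or] at hnl
    obtain ⟨hc1, hnlt⟩ := hnl
    by_cases hg : c = '/' ∧ (t ++ rest).head? = some '/'
    · obtain ⟨rfl, hh⟩ := hg
      obtain ⟨d, t', rfl⟩ : ∃ d t', t = d :: t' := by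
        cases t with
        | nil =>
          rcases hr with rfl | ⟨r, rfl⟩
          · simp at hh
          · simp at hh
        | cons d t' => exact ⟨d, t', rfl⟩
      have hd : d = '/' := by simpa using hh
      subst hd
      rw [List.cons_append, altGo, if_pos (by simp)]
      rw [show scan1 ('/' :: '/' :: t') = some ([], t') by simp [scan1]]
      have hnt' : '\n' ∉ t' := fun hmem => hnlt (List.mem_cons_of_mem _ hmem)
      have hall : ∀ a ∈ t', (a ≠ '\n' : Bool) := fun a ha => by
        simp only [decide_eq_true_iff]
        exact fun h => hnt' (h ▸ ha)
      have htw : ((('/' :: t') ++ rest).tail.takeWhile (fun a => (a ≠ '\n' : Bool))) = t' := by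
        simp only [List.cons_append, List.tail_cons]
        rw [List.takeWhile_append_of_pos hall]
        rcases hr with rfl | ⟨r, rfl⟩ <;> simp [List.takeWhile]
      have hdw : ((('/' :: t') ++ rest).tail.dropWhile (fun a => (a ≠ '\n' : Bool))) = rest := by
        simp only [List.cons_append, List.tail_cons]
        rw [List.dropWhile_append_of_pos hall]
        rcases hr with rfl | ⟨r, rfl⟩ <;> simp [List.dropWhile]
      rw [htw, hdw]
      simp
    · have hg' : ¬(c = '/' ∧ t.head? = some '/') := by
        rintro ⟨rfl, hh⟩
        cases t with
        | nil => simp at hh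
        | cons d t' => exact hg ⟨rfl, by simpa using hh⟩
      rw [List.cons_append, altGo, if_neg (by
        rcases hg'' : (t ++ rest).head? with _ | a
        · simp
        · intro hcon
          exact hg ⟨hcon.1, by rw [hg'', hcon.2]⟩)]
      rw [ih hnlt]
      rw [show scan1 (c :: t) = (scan1 t).map (fun pq => (c :: pq.1, pq.2)) by
          simp [scan1, hg']]
      rcases hs : scan1 t with _ | ⟨p, q⟩ <;> simp

theorem splitNL_no_nl (l : List Char) (h : '\n' ∉ l) : splitNL l = [l] := by
  induction l with
  | nil => rfl
  | cons c r ih =>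
    simp only [List.mem_cons, not_or] at h
    simp only [splitNL, if_neg (Ne.symm h.1), ih h.2]

theorem splitNL_append (l r : List Char) (h : '\n' ∉ l) :
    splitNL (l ++ '\n' :: r) = l :: splitNL r := by
  induction l with
  | nil => simp [splitNL]
  | cons c t ih =>
    simp only [List.mem_cons, not_or] at h
    simp only [List.cons_append, splitNL, if_neg (Ne.symm h.1), ih h.2]

theorem convertLineA_eq_match (l : List Char) :
    convertLineA l = (match scan1 l with
      | none => l
      | some (p, q) => p ++ "/* ".toList ++ PySem.Chars.strip q ++ " */".toList) := by
  rcases hs : scan1 l with _ | ⟨p, q⟩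
  · simp [convertLineA_none l hs]
  · simp [convertLineA_some l p q hs]

theorem main_aux (n : Nat) (cs : List Char) (hn : cs.length ≤ n) :
    PySem.Chars.join ['\n'] ((splitNL cs).map convertLineA) = altGo cs := by
  induction n generalizing cs with
  | zero =>
    have : cs = [] := List.length_eq_zero_iff.mp (Nat.le_zero.mp hn)
    subst this
    rw [show splitNL [] = [[]] from rfl, List.map_cons, List.map_nil,
      PySem.Chars.join_singleton, convertLineA_eq_match]
    simp [scan1, altGo]
  | succ n ih =>
    have hnl : '\n' ∉ cs.takeWhile (fun a => (a ≠ '\n' : Bool)) := by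
      intro hmem
      simpa using List.mem_takeWhile_imp hmem
    have hcat : cs.takeWhile (fun a => (a ≠ '\n' : Bool))
        ++ cs.dropWhile (fun a => (a ≠ '\n' : Bool)) = cs := List.takeWhile_append_dropWhile
    rcases hd : cs.dropWhile (fun a => (a ≠ '\n' : Bool)) with _ | ⟨c, r⟩
    · -- no newline in cs
      have hcs : cs.takeWhile (fun a => (a ≠ '\n' : Bool)) = cs := by
        conv_rhs => rw [← hcat]
        rw [hd, List.append_nil]
      have hnl' : '\n' ∉ cs := hcs ▸ hnl
      rw [splitNL_no_nl cs hnl', List.map_cons, List.map_nil, PySem.Chars.join_singleton]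
      have := altGo_line cs [] hnl' (Or.inl rfl)
      rw [List.append_nil] at this
      rw [this, convertLineA_eq_match]
      simp [altGo]
    · have hc : c = '\n' := by
        have hne : cs.dropWhile (fun a => (a ≠ '\n' : Bool)) ≠ [] := by
          rw [hd]; exact List.cons_ne_nil _ _
        have h2 := List.head_dropWhile_not (p := fun a => (a ≠ '\n' : Bool)) (l := cs) hne
        have h3 : (cs.dropWhile (fun a => (a ≠ '\n' : Bool))).head hne = c := by
          simp only [hd, List.head_cons]
        rw [h3] at h2
        simpa using h2
      subst hc
      have hcs : cs = cs.takeWhile (fun a => (a ≠ '\n' : Bool)) ++ '\n' :: r := by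
        conv_lhs => rw [← hcat]
        rw [hd]
      have hr : r.length ≤ n := by
        have := congrArg List.length hcs
        simp at this
        omega
      rw [hcs, splitNL_append _ r hnl]
      rcases hsp : splitNL r with _ | ⟨hd', tl⟩
      · exact absurd hsp (splitNL_ne_nil r)
      · rw [List.map_cons, List.map_cons, PySem.Chars.join_cons_cons]
        rw [altGo_line _ ('\n' :: r) hnl (Or.inr ⟨r, rfl⟩)]
        rw [show altGo ('\n' :: r) = '\n' :: altGo r by rw [altGo, if_neg (by simp)]]
        have hihr := ih r hr
        rw [hsp, List.map_cons] at hihr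
        rw [hihr, convertLineA_eq_match]
        simp

theorem main_eq (cs : List Char) :
    PySem.Chars.join ['\n'] ((splitNL cs).map convertLineA) = altGo cs :=
  main_aux cs.length cs (Nat.le_refl _)

-- ===== VERDICT (by name: the statement is the Claim_ definition above) =====
theorem convert_comments_spec : Claim_equal_convert_comments := by
  intro text _
  show convert_comments text = convert_comments_alt text
  unfold convert_comments convert_comments_alt
  simp only [splitOn_eq_splitNL, PySem.List.foldl_append_singleton_eq_map, List.nil_append, main_eq]
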